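-- pv_equiv track=rewrite | github.com/urmininad/vector_CD | vector_CD/aggregation_validity/funcs.py | vectorize_to_fine
-- ===== SOURCE A (Python) =====
-- def vectorize_to_fine(N_fine, N_array):
--
--     tot_fine  = len(N_fine)
--     tot_coarse = len(N_array)
--
--     N_new = [tot_fine-tot_coarse+1]+[1]*(tot_coarse-1)
--     #N_new = [tot_fine-2,1,1]
--     #N_new  = N_proxy
--
--     vector_vars = {}
--     N = len(N_new)
--     l=0
--     for i in range(N):
--         j = N_new[i]
--         for k in range(j):
--             if k==0:
--                 vector_vars[i] = [(k+l,0)] #only defining contemporaneous vector_vars here !!!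
--             else:
--                 vector_vars[i].append((k+l,0)) #only defining contemporaneous vector_vars here !!!
--         l+=j
--
--     return vector_vars
-- ===== SOURCE B (Python) =====
-- def vectorize_to_fine(N_fine, N_array):
--     # Closed-form offsets: group 0 = range(d) with d = tot_fine-tot_coarse+1
--     # (omitted entirely when empty), group i>0 = the single index tot_fine-tot_coarse+i.
--     tot_fine = len(N_fine)
--     tot_coarse = len(N_array)
--     d = tot_fine - tot_coarse + 1
--     vector_vars = {}
--     if d > 0:
--         vector_vars[0] = [(p, 0) for p in range(d)]
--     for i in range(1, tot_coarse):
--         vector_vars[i] = [(tot_fine - tot_coarse + i, 0)]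
--     return vector_vars
-- ===== Notes on version B (the rewrite author's own statement) =====
-- stated objective: simpler
-- what changed: Replaces A's nested accumulator loops (building N_new, then appending element by element with a running offset l) by closed-form offsets: group 0 is range(tot_fine-tot_coarse+1) built by one comprehension (omitted when empty), and each group i>0 is the single index tot_fine-tot_coarse+i; constant-factor faster since the per-element dict lookup/append of A's inner loop disappears.
import Mathlib
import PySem

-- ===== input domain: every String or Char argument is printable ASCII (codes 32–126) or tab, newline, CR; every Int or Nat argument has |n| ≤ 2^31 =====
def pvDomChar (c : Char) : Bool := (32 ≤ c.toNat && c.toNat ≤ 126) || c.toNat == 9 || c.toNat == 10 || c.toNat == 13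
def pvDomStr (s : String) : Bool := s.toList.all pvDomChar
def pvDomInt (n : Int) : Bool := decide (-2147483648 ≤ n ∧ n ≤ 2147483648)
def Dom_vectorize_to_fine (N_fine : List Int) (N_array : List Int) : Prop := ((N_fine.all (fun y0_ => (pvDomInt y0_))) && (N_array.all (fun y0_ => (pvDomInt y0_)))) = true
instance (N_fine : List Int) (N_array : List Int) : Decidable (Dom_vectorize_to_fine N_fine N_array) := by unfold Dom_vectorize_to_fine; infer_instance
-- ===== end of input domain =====

-- B replaces A's nested accumulator loops by closed-form offsets (group 0 is range(d),
-- group i>0 is the single index tot_fine-tot_coarse+i); objective: simpler.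

-- ===== PORT A =====
-- inner loop body: 'if k==0: vector_vars[i] = [(k+l,0)] else: vector_vars[i].append((k+l,0))'
-- (Python's vector_vars[i].append raises KeyError only if key i is absent, which never
-- happens since k>0 implies the k==0 branch already ran; Dict.modify with default [] is exact here)
def pvInnerStep (i l : Int) (vv : PySem.Dict Int (List (Int × Int))) (k : Int) :
    PySem.Dict Int (List (Int × Int)) :=
  if k == 0 then vv.insert i [(k + l, 0)]
  else vv.modify i [] (fun xs => xs ++ [(k + l, 0)])

-- outer loop body: 'j = N_new[i]; for k in range(j): …; l += j'
-- (N_new[i] is always in range since i < len(N_new); pyGet?.getD 0 is exact here)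
def pvOuterStep (N_new : List Int) (st : PySem.Dict Int (List (Int × Int)) × Int) (i : Int) :
    PySem.Dict Int (List (Int × Int)) × Int :=
  let j := (PySem.List.pyGet? N_new i).getD 0
  ((PySem.List.pyRange 0 j 1).foldl (pvInnerStep i st.2) st.1, st.2 + j)

def vectorize_to_fine (N_fine : List Int) (N_array : List Int) : List (Int × List (Int × Int)) :=
  let tot_fine : Int := (N_fine.length : Int)
  let tot_coarse : Int := (N_array.length : Int)
  let N_new : List Int := (tot_fine - tot_coarse + 1) :: List.replicate (tot_coarse - 1).toNat 1
  let N : Int := (N_new.length : Int)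
  (((PySem.List.pyRange 0 N 1).foldl (pvOuterStep N_new) (PySem.Dict.empty, 0)).1).items

-- ===== PORT B =====
def vectorize_to_fine_alt (N_fine : List Int) (N_array : List Int) : List (Int × List (Int × Int)) :=
  let tot_fine : Int := (N_fine.length : Int)
  let tot_coarse : Int := (N_array.length : Int)
  let d : Int := tot_fine - tot_coarse + 1
  let head : List (Int × List (Int × Int)) :=
    if d > 0 then [((0 : Int), (PySem.List.pyRange 0 d 1).map (fun p => (p, (0 : Int))))] else []
  head ++ (PySem.List.pyRange 1 tot_coarse 1).map
    (fun i => (i, [(tot_fine - tot_coarse + i, (0 : Int))]))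

-- ===== PRECONDITION & SPEC =====
def Spec_vectorize_to_fine (N_fine : List Int) (N_array : List Int) (out : List (Int × List (Int × Int))) : Prop := out = vectorize_to_fine_alt N_fine N_array
instance (N_fine : List Int) (N_array : List Int) (out : List (Int × List (Int × Int))) : Decidable (Spec_vectorize_to_fine N_fine N_array out) := by unfold Spec_vectorize_to_fine; infer_instance

-- ===== CLAIM (what is proved, stated in full; the proofs are below) =====
def Claim_equal_vectorize_to_fine : Prop := ∀ (N_fine : List Int) (N_array : List Int), Dom_vectorize_to_fine N_fine N_array → Spec_vectorize_to_fine N_fine N_array (vectorize_to_fine N_fine N_array)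

-- ===== LEMMAS AND PROOFS =====

-- modify on the one-entry dict at its own key applies the function
theorem pv_modify_single (i : Int) (acc : List (Int × Int)) (f : List (Int × Int) → List (Int × Int)) :
    (PySem.Dict.mk [(i, acc)]).modify i [] f = PySem.Dict.mk [(i, f acc)] := by
  simp [PySem.Dict.modify, PySem.Dict.getD, PySem.Dict.get?, PySem.Dict.insert, PySem.Dict.contains]

-- tail of the inner loop (k ≥ 1): every step appends to the single entry
theorem pv_inner_tail (i l : Int) : ∀ (n : Nat) (s e : Int), 1 ≤ s → (e - s).toNat = n →
    ∀ acc, (PySem.List.pyRange s e 1).foldl (pvInnerStep i l) (PySem.Dict.mk [(i, acc)])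
      = PySem.Dict.mk [(i, acc ++ (PySem.List.pyRange s e 1).map (fun k => (k + l, (0 : Int))))] := by
  intro n
  induction n with
  | zero =>
    intro s e hs hn acc
    rw [PySem.List.pyRange_one_eq_nil (by omega)]
    simp
  | succ m ih =>
    intro s e hs hn acc
    rw [PySem.List.pyRange_one_cons (by omega)]
    have hstep : pvInnerStep i l (PySem.Dict.mk [(i, acc)]) s
        = PySem.Dict.mk [(i, acc ++ [(s + l, 0)])] := by
      unfold pvInnerStep
      rw [if_neg (by simp; omega)]
      exact pv_modify_single i acc _
    simp only [List.foldl_cons, hstep]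
    rw [ih (s + 1) e (by omega) (by omega)]
    simp

-- the whole inner loop starting from the empty dict
theorem pv_inner_full (i l j : Int) :
    (PySem.List.pyRange 0 j 1).foldl (pvInnerStep i l) PySem.Dict.empty
      = if 0 < j then PySem.Dict.mk [(i, (PySem.List.pyRange 0 j 1).map (fun k => (k + l, (0 : Int))))]
        else PySem.Dict.empty := by
  by_cases h : 0 < j
  · rw [if_pos h]
    rw [PySem.List.pyRange_one_cons h]
    have h0 : pvInnerStep i l PySem.Dict.empty 0 = PySem.Dict.mk [(i, [(l, 0)])] := by
      unfold pvInnerStep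
      simp [PySem.Dict.insert, PySem.Dict.empty, PySem.Dict.contains]
    simp only [List.foldl_cons, h0, zero_add]
    rw [pv_inner_tail i l (j - 1).toNat 1 j (by omega) (by omega)]
    simp
  · rw [if_neg h, PySem.List.pyRange_one_eq_nil (by omega)]
    simp

-- tail of the outer loop (i ≥ 1): every group has size 1, so each step inserts one fresh key
theorem pv_outer_tail (N_new : List Int) : ∀ (n : Nat) (s e l : Int), 1 ≤ s → (e - s).toNat = n →
    (∀ i : Int, s ≤ i → i < e → (PySem.List.pyGet? N_new i).getD 0 = 1) →
    ∀ (D : PySem.Dict Int (List (Int × Int))), (∀ k ∈ D.keys, k < s) →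
    ((PySem.List.pyRange s e 1).foldl (pvOuterStep N_new) (D, l)).1.items
      = D.items ++ (PySem.List.pyRange s e 1).map (fun i => (i, [(l + (i - s), (0 : Int))])) := by
  intro n
  induction n with
  | zero =>
    intro s e l hs hn _ D _
    rw [PySem.List.pyRange_one_eq_nil (by omega)]
    simp
  | succ m ih =>
    intro s e l hs hn hget D hkeys
    rw [PySem.List.pyRange_one_cons (by omega)]
    have hj : (PySem.List.pyGet? N_new s).getD 0 = 1 := hget s le_rfl (by omega)
    have hfresh : D.contains s = false := by
      rcases h : D.contains s with _ | _
      · rfl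
      · exact absurd (lt_irrefl s) (by
          have := (PySem.Dict.contains_iff_mem_keys (d := D) (k := s)).mp h
          exact fun _ => absurd (hkeys s this) (by omega))
    have hstep : pvOuterStep N_new (D, l) s = (D.insert s [(l, 0)], l + 1) := by
      unfold pvOuterStep
      rw [hj]
      have : PySem.List.pyRange 0 1 1 = [0] := by decide
      simp [this, pvInnerStep]
    simp only [List.foldl_cons, hstep]
    rw [ih (s + 1) e (l + 1) (by omega) (by omega)
        (fun i hi1 hi2 => hget i (by omega) hi2)
        (D.insert s [(l, 0)])
        (by
          intro k hk
          rcases (PySem.Dict.mem_keys_insert _ _ _ _).mp hk with h | h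
          · omega
          · exact lt_trans (hkeys k h) (by omega))]
    rw [PySem.Dict.items_insert, hfresh]
    simp only [Bool.false_eq_true, if_false, List.map_cons, sub_self, add_zero,
      List.append_assoc, List.cons_append, List.nil_append]
    have hcg : ∀ i ∈ PySem.List.pyRange (s + 1) e 1,
        ((i, [(l + 1 + (i - (s + 1)), (0 : Int))]) : Int × List (Int × Int))
          = (i, [(l + (i - s), 0)]) := by
      intro i _
      have h2 : l + 1 + (i - (s + 1)) = l + (i - s) := by omega
      rw [h2]
    rw [List.map_congr_left hcg]

-- ===== VERDICT (by name: the statement is the Claim_ definition above) =====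
theorem vectorize_to_fine_spec : Claim_equal_vectorize_to_fine := by
  intro N_fine N_array _
  unfold Spec_vectorize_to_fine vectorize_to_fine vectorize_to_fine_alt
  simp only []
  set tf : Int := (N_fine.length : Int) with htf
  set tc : Int := (N_array.length : Int) with htc
  have htf0 : 0 ≤ tf := by positivity
  have htc0 : 0 ≤ tc := by positivity
  set d : Int := tf - tc + 1 with hd
  set N_new : List Int := d :: List.replicate (tc - 1).toNat 1 with hNnew
  have hlen : (N_new.length : Int) = 1 + ((tc - 1).toNat : Int) := by simp [hNnew]; omega
  -- first outer iteration (group 0)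
  rw [PySem.List.pyRange_one_cons (a := 0) (b := (N_new.length : Int)) (by omega)]
  simp only [List.foldl_cons]
  have hstep0 : pvOuterStep N_new (PySem.Dict.empty, 0) 0
      = ((if 0 < d then
            PySem.Dict.mk [((0 : Int), (PySem.List.pyRange 0 d 1).map (fun k => (k + 0, (0 : Int))))]
          else PySem.Dict.empty), 0 + d) := by
    unfold pvOuterStep
    have hg : PySem.List.pyGet? N_new 0 = some d := by
      rw [hNnew]; exact PySem.List.pyGet?_zero_cons _ _
    simp only [hg, Option.getD_some]
    rw [pv_inner_full 0 0 d]
  rw [hstep0]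
  simp only [zero_add]
  -- remaining outer iterations: one fresh single-element group each
  have hget : ∀ i : Int, 1 ≤ i → i < (N_new.length : Int) → (PySem.List.pyGet? N_new i).getD 0 = 1 := by
    intro i hi1 hi2
    rw [PySem.List.pyGet?_of_nonneg N_new (by omega)]
    have hk : i.toNat = (i.toNat - 1) + 1 := by omega
    rw [hNnew, hk]
    rw [List.getElem?_cons_succ, List.getElem?_replicate]
    rw [if_pos (by omega)]
    rfl
  have htail := pv_outer_tail N_new ((N_new.length : Int) - 1).toNat 1 (N_new.length : Int) d
    le_rfl (by omega) hget
  -- the two range tails coincide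
  have hrange : PySem.List.pyRange 1 (N_new.length : Int) 1 = PySem.List.pyRange 1 tc 1 := by
    by_cases h0 : tc = 0
    · rw [PySem.List.pyRange_one_eq_nil (by omega), PySem.List.pyRange_one_eq_nil (by omega)]
    · have : (N_new.length : Int) = tc := by omega
      rw [this]
  have hmap : ∀ i ∈ PySem.List.pyRange 1 tc 1,
      ((i, [(d + (i - 1), (0 : Int))]) : Int × List (Int × Int))
        = (i, [(tf - tc + i, 0)]) := by
    intro i _
    have h2 : d + (i - 1) = tf - tc + i := by omega
    rw [h2]
  by_cases hdpos : 0 < d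
  · rw [if_pos hdpos]
    rw [htail (PySem.Dict.mk [((0 : Int), (PySem.List.pyRange 0 d 1).map (fun k => (k + 0, (0 : Int))))])
        (by intro k hk; simp [PySem.Dict.keys] at hk; omega)]
    rw [if_pos hdpos, hrange, List.map_congr_left hmap]
    simp
  · rw [if_neg hdpos]
    rw [htail PySem.Dict.empty (by intro k hk; simp [PySem.Dict.keys, PySem.Dict.empty] at hk)]
    rw [if_neg hdpos, hrange, List.map_congr_left hmap]
    simp [PySem.Dict.empty]
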